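-- pv_equiv track=rewrite | github.com/vandmo/advent-of-code | 2016/07/parts.py | supports_ssl
-- ===== SOURCE A (Python) =====
-- def parse(ip: str):
--     class ParsedIp:
--         def __init__(self):
--             self.supernets = []
--             self.hypernets = []
--
--     r = ParsedIp()
--     while True:
--         splitted = ip.split("[", maxsplit=1)
--         if len(splitted) == 1:
--             if splitted[0]:
--                 r.supernets.append(splitted[0])
--             break
--         a, ip = splitted
--         b, ip = ip.split("]", maxsplit=1)
--         if a:
--             r.supernets.append(a)
--         if b:
--             r.hypernets.append(b)
--     return r
--
-- def supports_ssl(ip: str):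
--     parsed = parse(ip)
--     babs = set()
--     for supernet in parsed.supernets:
--         for i in range(len(supernet) - 2):
--             if supernet[i] == supernet[i + 2] and supernet[i] != supernet[i + 1]:
--                 babs.add(f"{supernet[i+1]}{supernet[i]}{supernet[i+1]}")
--     for bab in babs:
--         for hypernet in parsed.hypernets:
--             if bab in hypernet:
--                 return True
--     return False
-- ===== SOURCE B (Python) =====
-- def supports_ssl(ip: str):
--     # One pass: track whether we are inside brackets, keep a 2-char rolling
--     # window (reset at every bracket), collect hypernet ABA triplets and the
--     # mirrored BABs of supernet ABAs, then intersect the two sets.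
--     in_hyp = False
--     w = ""
--     hyp = set()
--     sup = set()
--     for ch in ip:
--         if ch == '[':
--             in_hyp = True
--             w = ""
--         elif ch == ']':
--             in_hyp = False
--             w = ""
--         else:
--             if len(w) == 2 and w[0] == ch and w[1] != ch:
--                 if in_hyp:
--                     hyp.add(w + ch)
--                 else:
--                     sup.add(w[1] + w[0] + w[1])
--             w = (w + ch)[-2:]
--     return not hyp.isdisjoint(sup)
-- ===== Notes on version B (the rewrite author's own statement) =====
-- stated objective: alternative
-- what changed: Replaced A's parse-into-supernet/hypernet-lists helper plus nested babs-times-hypernets substring loops by a single left-to-right scan with an inside-brackets flag and a 2-char rolling window that collects hypernet ABA triplets and mirrored supernet BABs into two sets, finishing with one set intersection.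
import Mathlib
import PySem

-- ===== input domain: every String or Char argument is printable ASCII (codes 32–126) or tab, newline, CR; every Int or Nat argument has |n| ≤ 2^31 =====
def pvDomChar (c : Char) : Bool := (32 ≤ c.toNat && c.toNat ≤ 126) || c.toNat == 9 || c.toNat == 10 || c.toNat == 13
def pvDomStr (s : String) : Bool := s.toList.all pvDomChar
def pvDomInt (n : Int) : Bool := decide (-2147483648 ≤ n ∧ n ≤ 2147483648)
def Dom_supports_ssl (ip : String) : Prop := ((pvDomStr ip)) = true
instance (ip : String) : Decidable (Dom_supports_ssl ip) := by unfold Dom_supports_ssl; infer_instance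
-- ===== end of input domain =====

-- B replaces A's parse-into-lists helper and nested substring loops by one scan with an
-- inside-brackets flag, a rolling 2-char window and two sets intersected at the end (alternative decomposition).

-- ===== PORT A =====
-- proof-side model of str.split(sep, 1) for a one-char sep: first piece / rest after first occurrence
def pvSplitOnce (c : Char) : List Char → Option (List Char × List Char)
  | [] => none
  | x :: t => if x = c then some ([], t) else (pvSplitOnce c t).map (fun p => (x :: p.1, p.2))

theorem pvSplitOnce_length {c : Char} : ∀ {s a r : List Char},
    pvSplitOnce c s = some (a, r) → s.length = a.length + 1 + r.length := by
  intro s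
  induction s with
  | nil => intro a r h; simp [pvSplitOnce] at h
  | cons x t ih =>
    intro a r h
    simp only [pvSplitOnce] at h
    split at h
    · simp at h; obtain ⟨h1, h2⟩ := h; subst h1; subst h2; simp; omega
    · cases hs : pvSplitOnce c t with
      | none => rw [hs] at h; simp at h
      | some p =>
        obtain ⟨a', r'⟩ := p
        rw [hs] at h; simp at h
        obtain ⟨h1, h2⟩ := h
        subst h1; subst h2
        have := ih (a := a') (r := r') hs
        simp; omega

-- characterization of PySem.Chars.splitOnMax for a single-char separator and maxsplit = 1
theorem pvSplitGo_zero (c : Char) (t cur : List Char) (ps : List (List Char)) (f : Nat) :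
    PySem.Chars.splitOnMax.go [c] (f + 1) 0 t cur ps = ps.reverse ++ [cur.reverse ++ t] := by
  cases t <;> simp [PySem.Chars.splitOnMax.go]

theorem pvSplitGo_one (c : Char) : ∀ (s : List Char) (f : Nat), s.length ≤ f →
    ∀ (cur : List Char) (ps : List (List Char)),
    PySem.Chars.splitOnMax.go [c] (f + 1) 1 s cur ps =
      match pvSplitOnce c s with
      | none => ps.reverse ++ [cur.reverse ++ s]
      | some (a, r) => ps.reverse ++ [cur.reverse ++ a, r] := by
  intro s
  induction s with
  | nil => intro f _ cur ps; simp [PySem.Chars.splitOnMax.go, pvSplitOnce]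
  | cons x t ih =>
    intro f hf cur ps
    simp only [pvSplitOnce]
    obtain ⟨f', rfl⟩ : ∃ f', f = f' + 1 := ⟨f - 1, by simp at hf; omega⟩
    by_cases hx : x = c
    · subst hx
      simp only [PySem.Chars.splitOnMax.go, one_ne_zero, ↓reduceIte, List.isPrefixOf_cons₂_self,
        List.isPrefixOf_nil_left, tsub_self, List.length_cons, List.length_nil, zero_add,
        List.drop_succ_cons, List.drop_zero]
      rw [pvSplitGo_zero]
      simp
    · simp only [PySem.Chars.splitOnMax.go, one_ne_zero, ↓reduceIte, List.isPrefixOf_iff_prefix,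
        List.cons_prefix_cons, List.nil_prefix, and_true, tsub_self, List.length_cons,
        List.length_nil, zero_add, List.drop_succ_cons, List.drop_zero]
      rw [if_neg (fun hcx => hx hcx.symm)]
      rw [ih f' (by simp at hf; omega)]
      cases hs : pvSplitOnce c t with
      | none => simp [hx]
      | some p => obtain ⟨a, r⟩ := p; simp [hx]

theorem pvSplitOnMax_char (c : Char) (s : List Char) :
    PySem.Chars.splitOnMax s [c] 1 =
      match pvSplitOnce c s with
      | none => [s]
      | some (a, r) => [a, r] := by
  have h := pvSplitGo_one c s s.length (le_refl _) [] []
  simp only [List.reverse_nil, List.nil_append] at h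
  simp only [PySem.Chars.splitOnMax, Int.reduceLT, ↓reduceIte, Int.toNat_one]
  rw [h]

theorem pvSplitOnMax_two_length {c : Char} {s a r : List Char}
    (h : PySem.Chars.splitOnMax s [c] 1 = [a, r]) : s.length = a.length + 1 + r.length := by
  rw [pvSplitOnMax_char] at h
  cases hs : pvSplitOnce c s with
  | none => rw [hs] at h; simp at h
  | some p =>
    obtain ⟨a', r'⟩ := p
    rw [hs] at h; simp at h
    obtain ⟨h1, h2⟩ := h
    subst h1; subst h2
    exact pvSplitOnce_length hs

-- transliteration of A's parse: repeatedly split off "…[" and "…]" pieces, keeping nonempty ones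
def pvParse (ip : List Char) (sup hyp : List (List Char)) :
    Option (List (List Char) × List (List Char)) :=
  match h1 : PySem.Chars.splitOnMax ip ['['] 1 with
  | [s0] => some (if s0 = [] then sup else sup ++ [s0], hyp)
  | [a, ip1] =>
    match h2 : PySem.Chars.splitOnMax ip1 [']'] 1 with
    | [b, ip2] =>
      pvParse ip2 (if a = [] then sup else sup ++ [a]) (if b = [] then hyp else hyp ++ [b])
    | _ => none   -- Python: "b, ip = ip.split(']', 1)" raises ValueError
  | _ => none     -- unreachable: split(sep, 1) returns 1 or 2 pieces
  termination_by ip.length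
  decreasing_by
    have l1 := pvSplitOnMax_two_length h1
    have l2 := pvSplitOnMax_two_length h2
    omega

def supports_ssl (ip : String) : Bool :=
  match pvParse ip.toList [] [] with
  | none => false   -- Python raises ValueError here; excluded by Pre_supports_ssl
  | some (sups, hyps) =>
    let babs : PySem.Set (List Char) :=
      sups.foldl (fun babs seg =>
        (List.range (seg.length - 2)).foldl (fun babs i =>
          if seg.getD i ' ' = seg.getD (i + 2) ' ' ∧ seg.getD i ' ' ≠ seg.getD (i + 1) ' ' then
            babs.add [seg.getD (i + 1) ' ', seg.getD i ' ', seg.getD (i + 1) ' ']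
          else babs) babs) PySem.Set.empty
    babs.any (fun bab => hyps.any (fun h => PySem.Chars.isIn bab h))

-- ===== PORT B =====
def pvStep (st : Bool × List Char × PySem.Set (List Char) × PySem.Set (List Char)) (ch : Char) :
    Bool × List Char × PySem.Set (List Char) × PySem.Set (List Char) :=
  let (inH, w, hyp, sup) := st
  if ch = '[' then (true, [], hyp, sup)
  else if ch = ']' then (false, [], hyp, sup)
  else
    let p :=
      match w with
      | [x, y] =>
        if x = ch ∧ y ≠ ch then
          if inH then (PySem.Set.add hyp [x, y, ch], sup)
          else (hyp, PySem.Set.add sup [y, x, y])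
        else (hyp, sup)
      | _ => (hyp, sup)
    let w2 := w ++ [ch]
    (inH, w2.drop (w2.length - 2), p.1, p.2)

def supports_ssl_alt (ip : String) : Bool :=
  let st := ip.toList.foldl pvStep (false, [], PySem.Set.empty, PySem.Set.empty)
  !(PySem.Set.isdisjoint st.2.2.1 st.2.2.2)

-- ===== PRECONDITION & SPEC =====
-- the bracket state machine of ip: False = outside brackets, True = inside
def pvBrState (s : List Char) : Bool :=
  s.foldl (fun st c => if st then decide (c ≠ ']') else decide (c = '[')) false

-- Pre_ excludes exactly the inputs on which A raises ValueError: those where some '['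
-- is never followed by a matching ']' (the bracket state machine ends inside brackets).
def Pre_supports_ssl (ip : String) : Prop := pvBrState ip.toList = false
instance (ip : String) : Decidable (Pre_supports_ssl ip) := by unfold Pre_supports_ssl; infer_instance

def pvWitness_supports_ssl : String := "aba[bab]"

def Spec_supports_ssl (ip : String) (out : Bool) : Prop := out = supports_ssl_alt ip
instance (ip : String) (out : Bool) : Decidable (Spec_supports_ssl ip out) := by
  unfold Spec_supports_ssl; infer_instance

-- ===== CLAIM (what is proved, stated in full; the proofs are below) =====
def Claim_equal_supports_ssl : Prop :=
  ∀ (ip : String), Dom_supports_ssl ip → Pre_supports_ssl ip →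
    Spec_supports_ssl ip (supports_ssl ip)

-- ===== LEMMAS AND PROOFS =====


-- all consecutive 3-windows of a char list
def pvTris : List Char → List (List Char)
  | a :: b :: c :: t => [a, b, c] :: pvTris (b :: c :: t)
  | _ => []

def pvOkC (c : Char) : Prop := c ≠ '[' ∧ c ≠ ']'

-- s has a bracket-free ABA window with letters a (outer) and b (middle)
def pvAbaWin (s : List Char) (a b : Char) : Prop :=
  [a, b, a] ∈ pvTris s ∧ a ≠ b ∧ pvOkC a ∧ pvOkC b

-- t is the mirrored BAB of a bracket-free ABA window of s
def pvSupWin (s t : List Char) : Prop := ∃ a b, pvAbaWin s a b ∧ t = [b, a, b]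

-- t is a bracket-free ABA window of s
def pvHypWin (s t : List Char) : Prop := ∃ a b, pvAbaWin s a b ∧ t = [a, b, a]

theorem pvTris_short {s : List Char} (h : s.length ≤ 2) : pvTris s = [] := by
  match s with
  | [] => rfl
  | [_] => rfl
  | [_, _] => rfl
  | _ :: _ :: _ :: _ => simp at h

theorem pvMem_tris_iff_infix {s : List Char} {a b c : Char} :
    [a, b, c] ∈ pvTris s ↔ [a, b, c] <:+: s := by
  induction s using pvTris.induct with
  | case1 x y z t ih =>
    simp only [pvTris, List.mem_cons, ih, List.infix_cons_iff (a := x)]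
    constructor
    · rintro (h | h)
      · left; simp only [List.cons.injEq, and_true] at h
        obtain ⟨h1, h2, h3⟩ := h
        simp [List.cons_prefix_cons, h1, h2, h3]
      · right; exact h
    · rintro (h | h)
      · left
        simp [List.cons_prefix_cons] at h
        obtain ⟨h1, h2, h3⟩ := h; simp [h1, h2, h3]
      · right; exact h
  | case2 t h =>
    have ht : pvTris t = [] := by
      cases t with
      | nil => rfl
      | cons x t1 =>
        cases t1 with
        | nil => rfl
        | cons y t2 =>
          cases t2 with
          | nil => rfl
          | cons z t3 => exact absurd rfl (by exact fun hh => h x y z t3 hh)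
    have hlen : t.length ≤ 2 := by
      cases t with
      | nil => simp
      | cons x t1 =>
        cases t1 with
        | nil => simp
        | cons y t2 =>
          cases t2 with
          | nil => simp
          | cons z t3 => exact absurd rfl (by exact fun hh => h x y z t3 hh)
    rw [ht]
    simp only [List.not_mem_nil, false_iff]
    intro hm
    have := hm.length_le
    simp at this
    omega

theorem pvInfix_cross : ∀ (u : List Char) {v : List Char} {br a b c : Char},
    [a, b, c] <:+: u ++ br :: v → a ≠ br → b ≠ br → c ≠ br →
    [a, b, c] <:+: u ∨ [a, b, c] <:+: v := by
  intro u
  induction u with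
  | nil =>
    intro v br a b c h ha hb hc
    simp only [List.nil_append, List.infix_cons_iff] at h
    rcases h with h | h
    · simp [List.cons_prefix_cons] at h; exact absurd h.1 ha
    · right; exact h
  | cons x u' ih =>
    intro v br a b c h ha hb hc
    rw [List.cons_append, List.infix_cons_iff] at h
    rcases h with h | h
    · -- [a,b,c] is a prefix of x :: (u' ++ br :: v)
      rw [List.cons_prefix_cons] at h
      obtain ⟨rfl, h⟩ := h
      cases u' with
      | nil => simp [List.cons_prefix_cons] at h; exact absurd h.1 hb
      | cons y u'' =>
        cases u'' with
        | nil =>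
          simp [List.cons_prefix_cons] at h
          exact absurd h.2 hc
        | cons z u''' =>
          simp only [List.cons_append, List.cons_prefix_cons] at h
          obtain ⟨rfl, rfl, -⟩ := h
          left
          exact List.IsPrefix.isInfix (by simp [List.cons_prefix_cons])
    · rcases ih h ha hb hc with h' | h'
      · left; exact h'.trans (List.suffix_cons x u').isInfix
      · right; exact h'

theorem pvTris_getD : ∀ (s : List Char) (i : Nat), i + 2 < s.length →
    [s.getD i ' ', s.getD (i + 1) ' ', s.getD (i + 2) ' '] ∈ pvTris s := by
  intro s
  induction s with
  | nil => intro i h; simp at h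
  | cons x t ih =>
    intro i h
    cases i with
    | zero =>
      simp only [List.length_cons] at h
      match t, h with
      | y :: z :: t', _ => simp [pvTris]
    | succ i' =>
      have hm := ih i' (by simp at h; omega)
      have : pvTris t ⊆ pvTris (x :: t) := by
        intro e he
        match t, he with
        | y :: z :: t', he => simp only [pvTris]; right; exact he
      have hmem := this hm
      simpa using hmem

theorem pvMem_tris_exists : ∀ {s t : List Char}, t ∈ pvTris s →
    ∃ i, i + 2 < s.length ∧ t = [s.getD i ' ', s.getD (i + 1) ' ', s.getD (i + 2) ' '] := by
  intro s
  induction s using pvTris.induct with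
  | case1 x y z tt ih =>
    intro t ht
    simp only [pvTris, List.mem_cons] at ht
    rcases ht with rfl | ht
    · exact ⟨0, by simp, by simp⟩
    · obtain ⟨i, hi, rfl⟩ := ih ht
      exact ⟨i + 1, by simp at hi ⊢; omega, by simp⟩
  | case2 t h =>
    intro t' ht'
    exfalso
    cases t with
    | nil => simp [pvTris] at ht'
    | cons x t1 =>
      cases t1 with
      | nil => simp [pvTris] at ht'
      | cons y t2 =>
        cases t2 with
        | nil => simp [pvTris] at ht'
        | cons z t3 => exact h x y z t3 rfl

-- generic: membership after a conditional-add fold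
theorem pvMem_foldl_condAdd {ι : Type} (l : List ι) (P : ι → Prop) [DecidablePred P]
    (f : ι → List Char) (st : PySem.Set (List Char)) (t : List Char) :
    t ∈ l.foldl (fun s i => if P i then PySem.Set.add s (f i) else s) st ↔
      t ∈ st ∨ ∃ i ∈ l, P i ∧ t = f i := by
  induction l generalizing st with
  | nil => simp
  | cons x l' ih =>
    simp only [List.foldl_cons, ih]
    by_cases hx : P x
    · simp [hx, PySem.Set.mem_add]; tauto
    · simp [hx]

theorem pvAbaWin_short {w : List Char} {a b : Char} (hw : w.length ≤ 2) : ¬ pvAbaWin w a b := by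
  intro h
  rw [pvAbaWin, pvTris_short hw] at h
  simp at h

theorem pvAbaWin_reset {w s : List Char} {br a b : Char} (hw : w.length ≤ 2)
    (hbr : br = '[' ∨ br = ']') : pvAbaWin (w ++ br :: s) a b ↔ pvAbaWin s a b := by
  constructor
  · rintro ⟨hm, hab, hoa, hob⟩
    rw [pvMem_tris_iff_infix] at hm
    have hanb : a ≠ br := by rcases hbr with rfl | rfl; exact hoa.1; exact hoa.2
    have hbnb : b ≠ br := by rcases hbr with rfl | rfl; exact hob.1; exact hob.2
    rcases pvInfix_cross w hm hanb hbnb hanb with h | h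
    · exact absurd ⟨pvMem_tris_iff_infix.2 h, hab, hoa, hob⟩ (pvAbaWin_short hw)
    · exact ⟨pvMem_tris_iff_infix.2 h, hab, hoa, hob⟩
  · rintro ⟨hm, hab, hoa, hob⟩
    refine ⟨?_, hab, hoa, hob⟩
    rw [pvMem_tris_iff_infix] at hm ⊢
    exact hm.trans ((List.suffix_cons br s).isInfix.trans (List.suffix_append w (br :: s)).isInfix)

theorem pvAbaWin_cons3 {x y z : Char} {s : List Char} {a b : Char} :
    pvAbaWin (x :: y :: z :: s) a b ↔
      (a = x ∧ b = y ∧ z = x ∧ x ≠ y ∧ pvOkC x ∧ pvOkC y) ∨ pvAbaWin (y :: z :: s) a b := by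
  unfold pvAbaWin
  simp only [pvTris, List.mem_cons, List.cons.injEq, and_true]
  constructor
  · rintro ⟨h | h, hab, hoa, hob⟩
    · obtain ⟨rfl, rfl, hz⟩ := h
      exact Or.inl ⟨rfl, rfl, hz.symm, hab, hoa, hob⟩
    · exact Or.inr ⟨h, hab, hoa, hob⟩
  · rintro (⟨rfl, rfl, hz, hab, hoa, hob⟩ | ⟨h, hab, hoa, hob⟩)
    · exact ⟨Or.inl ⟨rfl, rfl, hz.symm⟩, hab, hoa, hob⟩
    · exact ⟨Or.inr h, hab, hoa, hob⟩

theorem pvSupWin_cons3 {x y z : Char} {s t : List Char} :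
    pvSupWin (x :: y :: z :: s) t ↔
      ((z = x ∧ x ≠ y ∧ pvOkC x ∧ pvOkC y) ∧ t = [y, x, y]) ∨ pvSupWin (y :: z :: s) t := by
  unfold pvSupWin
  constructor
  · rintro ⟨a, b, hw, rfl⟩
    rcases pvAbaWin_cons3.1 hw with ⟨rfl, rfl, h⟩ | h
    · exact Or.inl ⟨h, rfl⟩
    · exact Or.inr ⟨a, b, h, rfl⟩
  · rintro (⟨h, rfl⟩ | ⟨a, b, h, rfl⟩)
    · exact ⟨x, y, pvAbaWin_cons3.2 (Or.inl ⟨rfl, rfl, h⟩), rfl⟩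
    · exact ⟨a, b, pvAbaWin_cons3.2 (Or.inr h), rfl⟩

theorem pvHypWin_cons3 {x y z : Char} {s t : List Char} :
    pvHypWin (x :: y :: z :: s) t ↔
      ((z = x ∧ x ≠ y ∧ pvOkC x ∧ pvOkC y) ∧ t = [x, y, x]) ∨ pvHypWin (y :: z :: s) t := by
  unfold pvHypWin
  constructor
  · rintro ⟨a, b, hw, rfl⟩
    rcases pvAbaWin_cons3.1 hw with ⟨rfl, rfl, h⟩ | h
    · exact Or.inl ⟨h, rfl⟩
    · exact Or.inr ⟨a, b, h, rfl⟩
  · rintro (⟨h, rfl⟩ | ⟨a, b, h, rfl⟩)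
    · exact ⟨x, y, pvAbaWin_cons3.2 (Or.inl ⟨rfl, rfl, h⟩), rfl⟩
    · exact ⟨a, b, pvAbaWin_cons3.2 (Or.inr h), rfl⟩

-- outside scan: no '[' in s; flag stays false, hyp set untouched, sup set gains pvSupWin (w ++ s)
theorem pvScanOut : ∀ (s : List Char), '[' ∉ s → ∀ (w : List Char) (H S : PySem.Set (List Char)),
    w.length ≤ 2 → (∀ c ∈ w, pvOkC c) →
    ∃ w2 S2, s.foldl pvStep (false, w, H, S) = (false, w2, H, S2) ∧ w2.length ≤ 2 ∧
      (∀ c ∈ w2, pvOkC c) ∧ ∀ t, t ∈ S2 ↔ t ∈ S ∨ pvSupWin (w ++ s) t := by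
  intro s
  induction s with
  | nil =>
    intro _ w H S hw hok
    refine ⟨w, S, rfl, hw, hok, fun t => ?_⟩
    simp only [List.append_nil]
    constructor
    · exact Or.inl
    · rintro (h | ⟨a, b, hwin, rfl⟩)
      · exact h
      · exact absurd hwin (pvAbaWin_short hw)
  | cons c s' ih =>
    intro hin w H S hw hok
    have hcb : c ≠ '[' := fun h => hin (by simp [h])
    have hin' : '[' ∉ s' := fun h => hin (List.mem_cons_of_mem _ h)
    rw [List.foldl_cons]
    by_cases hc : c = ']'
    · subst hc
      have hstep : pvStep (false, w, H, S) ']' = (false, [], H, S) := by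
        simp [pvStep]
      rw [hstep]
      obtain ⟨w2, S2, heq, hw2, hok2, hmem⟩ := ih hin' [] H S (by simp) (by simp)
      refine ⟨w2, S2, heq, hw2, hok2, fun t => ?_⟩
      rw [hmem t]
      simp only [List.nil_append]
      have hres : ∀ a b, pvAbaWin (w ++ ']' :: s') a b ↔ pvAbaWin s' a b :=
        fun a b => pvAbaWin_reset hw (Or.inr rfl)
      constructor
      · rintro (h | ⟨a, b, hwin, rfl⟩)
        · exact Or.inl h
        · exact Or.inr ⟨a, b, (hres a b).2 hwin, rfl⟩
      · rintro (h | ⟨a, b, hwin, rfl⟩)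
        · exact Or.inl h
        · exact Or.inr ⟨a, b, (hres a b).1 hwin, rfl⟩
    · have hokc : pvOkC c := ⟨hcb, hc⟩
      rcases w with _ | ⟨x, _ | ⟨y, _ | ⟨z, w'⟩⟩⟩
      · have hstep : pvStep (false, [], H, S) c = (false, [c], H, S) := by
          simp [pvStep, hcb, hc]
        rw [hstep]
        obtain ⟨w2, S2, heq, hw2, hok2, hmem⟩ :=
          ih hin' [c] H S (by simp) (by intro e he; simp at he; subst he; exact hokc)
        exact ⟨w2, S2, heq, hw2, hok2, hmem⟩
      · have hstep : pvStep (false, [x], H, S) c = (false, [x, c], H, S) := by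
          simp [pvStep, hcb, hc]
        rw [hstep]
        have hokx : pvOkC x := hok x (by simp)
        obtain ⟨w2, S2, heq, hw2, hok2, hmem⟩ :=
          ih hin' [x, c] H S (by simp)
            (by intro e he; simp at he; rcases he with rfl | rfl
                · exact hokx
                · exact hokc)
        exact ⟨w2, S2, heq, hw2, hok2, hmem⟩
      · have hokx : pvOkC x := hok x (by simp)
        have hoky : pvOkC y := hok y (by simp)
        by_cases hcond : x = c ∧ y ≠ c
        · have hstep : pvStep (false, [x, y], H, S) c =
              (false, [y, c], H, PySem.Set.add S [y, x, y]) := by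
            simp [pvStep, hcb, hc, hcond]
          rw [hstep]
          obtain ⟨w2, S2, heq, hw2, hok2, hmem⟩ :=
            ih hin' [y, c] H (PySem.Set.add S [y, x, y]) (by simp)
              (by intro e he; simp at he; rcases he with rfl | rfl
                  · exact hoky
                  · exact hokc)
          refine ⟨w2, S2, heq, hw2, hok2, fun t => ?_⟩
          rw [hmem t]
          rw [PySem.Set.mem_add]
          obtain ⟨hxc, hyc⟩ := hcond
          subst hxc
          simp only [List.cons_append, List.nil_append]
          rw [pvSupWin_cons3]
          constructor
          · rintro ((h | rfl) | h)
            · exact Or.inl h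
            · exact Or.inr (Or.inl ⟨⟨rfl, fun hxy => hyc hxy.symm, hokx, hoky⟩, rfl⟩)
            · exact Or.inr (Or.inr h)
          · rintro (h | (⟨-, rfl⟩ | h))
            · exact Or.inl (Or.inl h)
            · exact Or.inl (Or.inr rfl)
            · exact Or.inr h
        · have hstep : pvStep (false, [x, y], H, S) c = (false, [y, c], H, S) := by
            simp only [pvStep, if_neg (show ¬ c = '[' from hcb), if_neg (show ¬ c = ']' from hc)]
            rw [if_neg hcond]
            simp
          rw [hstep]
          obtain ⟨w2, S2, heq, hw2, hok2, hmem⟩ :=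
            ih hin' [y, c] H S (by simp)
              (by intro e he; simp at he; rcases he with rfl | rfl
                  · exact hoky
                  · exact hokc)
          refine ⟨w2, S2, heq, hw2, hok2, fun t => ?_⟩
          rw [hmem t]
          simp only [List.cons_append, List.nil_append]
          rw [pvSupWin_cons3]
          constructor
          · rintro (h | h)
            · exact Or.inl h
            · exact Or.inr (Or.inr h)
          · rintro (h | (⟨⟨hzx, hxy, -, -⟩, rfl⟩ | h))
            · exact Or.inl h
            · exact absurd ⟨hzx.symm, fun hyceq => hxy (hzx ▸ hyceq ▸ rfl)⟩ hcond
            · exact Or.inr h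
      · simp at hw

-- inside scan: no ']' in s; flag stays true, sup set untouched, hyp set gains pvHypWin (w ++ s)
theorem pvScanIn : ∀ (s : List Char), ']' ∉ s → ∀ (w : List Char) (H S : PySem.Set (List Char)),
    w.length ≤ 2 → (∀ c ∈ w, pvOkC c) →
    ∃ w2 H2, s.foldl pvStep (true, w, H, S) = (true, w2, H2, S) ∧ w2.length ≤ 2 ∧
      (∀ c ∈ w2, pvOkC c) ∧ ∀ t, t ∈ H2 ↔ t ∈ H ∨ pvHypWin (w ++ s) t := by
  intro s
  induction s with
  | nil =>
    intro _ w H S hw hok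
    refine ⟨w, H, rfl, hw, hok, fun t => ?_⟩
    simp only [List.append_nil]
    constructor
    · exact Or.inl
    · rintro (h | ⟨a, b, hwin, rfl⟩)
      · exact h
      · exact absurd hwin (pvAbaWin_short hw)
  | cons c s' ih =>
    intro hin w H S hw hok
    have hcb : c ≠ ']' := fun h => hin (by simp [h])
    have hin' : ']' ∉ s' := fun h => hin (List.mem_cons_of_mem _ h)
    rw [List.foldl_cons]
    by_cases hc : c = '['
    · subst hc
      have hstep : pvStep (true, w, H, S) '[' = (true, [], H, S) := by
        simp [pvStep]
      rw [hstep]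
      obtain ⟨w2, H2, heq, hw2, hok2, hmem⟩ := ih hin' [] H S (by simp) (by simp)
      refine ⟨w2, H2, heq, hw2, hok2, fun t => ?_⟩
      rw [hmem t]
      simp only [List.nil_append]
      have hres : ∀ a b, pvAbaWin (w ++ '[' :: s') a b ↔ pvAbaWin s' a b :=
        fun a b => pvAbaWin_reset hw (Or.inl rfl)
      constructor
      · rintro (h | ⟨a, b, hwin, rfl⟩)
        · exact Or.inl h
        · exact Or.inr ⟨a, b, (hres a b).2 hwin, rfl⟩
      · rintro (h | ⟨a, b, hwin, rfl⟩)
        · exact Or.inl h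
        · exact Or.inr ⟨a, b, (hres a b).1 hwin, rfl⟩
    · have hokc : pvOkC c := ⟨hc, hcb⟩
      rcases w with _ | ⟨x, _ | ⟨y, _ | ⟨z, w'⟩⟩⟩
      · have hstep : pvStep (true, [], H, S) c = (true, [c], H, S) := by
          simp [pvStep, hcb, hc]
        rw [hstep]
        obtain ⟨w2, H2, heq, hw2, hok2, hmem⟩ :=
          ih hin' [c] H S (by simp) (by intro e he; simp at he; subst he; exact hokc)
        exact ⟨w2, H2, heq, hw2, hok2, hmem⟩
      · have hstep : pvStep (true, [x], H, S) c = (true, [x, c], H, S) := by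
          simp [pvStep, hcb, hc]
        rw [hstep]
        have hokx : pvOkC x := hok x (by simp)
        obtain ⟨w2, H2, heq, hw2, hok2, hmem⟩ :=
          ih hin' [x, c] H S (by simp)
            (by intro e he; simp at he; rcases he with rfl | rfl
                · exact hokx
                · exact hokc)
        exact ⟨w2, H2, heq, hw2, hok2, hmem⟩
      · have hokx : pvOkC x := hok x (by simp)
        have hoky : pvOkC y := hok y (by simp)
        by_cases hcond : x = c ∧ y ≠ c
        · have hstep : pvStep (true, [x, y], H, S) c =
              (true, [y, c], PySem.Set.add H [x, y, c], S) := by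
            simp [pvStep, hcb, hc, hcond]
          rw [hstep]
          obtain ⟨w2, H2, heq, hw2, hok2, hmem⟩ :=
            ih hin' [y, c] (PySem.Set.add H [x, y, c]) S (by simp)
              (by intro e he; simp at he; rcases he with rfl | rfl
                  · exact hoky
                  · exact hokc)
          refine ⟨w2, H2, heq, hw2, hok2, fun t => ?_⟩
          rw [hmem t]
          rw [PySem.Set.mem_add]
          obtain ⟨hxc, hyc⟩ := hcond
          subst hxc
          simp only [List.cons_append, List.nil_append]
          rw [pvHypWin_cons3]
          constructor
          · rintro ((h | rfl) | h)
            · exact Or.inl h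
            · exact Or.inr (Or.inl ⟨⟨rfl, fun hxy => hyc hxy.symm, hokx, hoky⟩, rfl⟩)
            · exact Or.inr (Or.inr h)
          · rintro (h | (⟨-, rfl⟩ | h))
            · exact Or.inl (Or.inl h)
            · exact Or.inl (Or.inr rfl)
            · exact Or.inr h
        · have hstep : pvStep (true, [x, y], H, S) c = (true, [y, c], H, S) := by
            simp only [pvStep, if_neg (show ¬ c = '[' from hc), if_neg (show ¬ c = ']' from hcb)]
            rw [if_neg hcond]
            simp
          rw [hstep]
          obtain ⟨w2, H2, heq, hw2, hok2, hmem⟩ :=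
            ih hin' [y, c] H S (by simp)
              (by intro e he; simp at he; rcases he with rfl | rfl
                  · exact hoky
                  · exact hokc)
          refine ⟨w2, H2, heq, hw2, hok2, fun t => ?_⟩
          rw [hmem t]
          simp only [List.cons_append, List.nil_append]
          rw [pvHypWin_cons3]
          constructor
          · rintro (h | h)
            · exact Or.inl h
            · exact Or.inr (Or.inr h)
          · rintro (h | (⟨⟨hzx, hxy, -, -⟩, rfl⟩ | h))
            · exact Or.inl h
            · exact absurd ⟨hzx.symm, fun hyceq => hxy (hzx ▸ hyceq ▸ rfl)⟩ hcond
            · exact Or.inr h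
      · simp at hw

theorem pvSplitOnce_none_iff {c : Char} {s : List Char} :
    pvSplitOnce c s = none ↔ c ∉ s := by
  induction s with
  | nil => simp [pvSplitOnce]
  | cons x t ih =>
    simp only [pvSplitOnce, List.mem_cons]
    by_cases hx : x = c
    · subst hx; simp
    · rw [if_neg hx]
      cases ht : pvSplitOnce c t with
      | none =>
        have hct := ih.1 ht
        simp only [Option.map_none]
        simp [hct, Ne.symm hx]
      | some p =>
        have hct : c ∈ t := by
          by_contra hc
          rw [ih.2 hc] at ht; cases ht
        simp [hct]

theorem pvSplitOnce_some {c : Char} : ∀ {s a r : List Char},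
    pvSplitOnce c s = some (a, r) → s = a ++ c :: r ∧ c ∉ a := by
  intro s
  induction s with
  | nil => intro a r h; simp [pvSplitOnce] at h
  | cons x t ih =>
    intro a r h
    simp only [pvSplitOnce] at h
    split at h
    · rename_i hx
      simp only [Option.some.injEq, Prod.mk.injEq] at h
      obtain ⟨h1, h2⟩ := h
      subst h1; subst h2; subst hx
      simp
    · rename_i hx
      cases ht : pvSplitOnce c t with
      | none => rw [ht] at h; simp at h
      | some p =>
        obtain ⟨a', r'⟩ := p
        rw [ht] at h
        simp only [Option.map_some, Option.some.injEq, Prod.mk.injEq] at h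
        obtain ⟨h1, h2⟩ := h
        subst h2
        obtain ⟨hs, hna⟩ := ih ht
        subst hs
        rw [← h1]
        refine ⟨rfl, ?_⟩
        simp only [List.mem_cons, not_or]
        exact ⟨fun hh => hx hh.symm, hna⟩

theorem pvParse_eq (ip : List Char) (sup hyp : List (List Char)) :
    pvParse ip sup hyp =
      match pvSplitOnce '[' ip with
      | none => some (if ip = [] then sup else sup ++ [ip], hyp)
      | some (a, ip1) =>
        match pvSplitOnce ']' ip1 with
        | some (b, ip2) =>
          pvParse ip2 (if a = [] then sup else sup ++ [a]) (if b = [] then hyp else hyp ++ [b])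
        | none => none := by
  rw [pvParse]
  split
  · rename_i s0 h1
    rw [pvSplitOnMax_char] at h1
    cases hs : pvSplitOnce '[' ip with
    | none => rw [hs] at h1; simp at h1; subst h1; simp
    | some p => rw [hs] at h1; obtain ⟨a, r⟩ := p; simp at h1
  · rename_i a ip1 h1
    rw [pvSplitOnMax_char] at h1
    cases hs : pvSplitOnce '[' ip with
    | none => rw [hs] at h1; simp at h1
    | some p =>
      obtain ⟨a', r'⟩ := p
      rw [hs] at h1
      simp only [List.cons.injEq, and_true] at h1
      obtain ⟨rfl, rfl⟩ := h1
      split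
      · rename_i b ip2 h2
        rw [pvSplitOnMax_char] at h2
        cases ht : pvSplitOnce ']' r' with
        | none => rw [ht] at h2; simp at h2
        | some q =>
          obtain ⟨b', r2⟩ := q
          rw [ht] at h2
          simp only [List.cons.injEq, and_true] at h2
          obtain ⟨rfl, rfl⟩ := h2
          simp [ht]
      · rename_i h2
        rw [pvSplitOnMax_char] at h2
        cases ht : pvSplitOnce ']' r' with
        | none => simp [ht]
        | some q =>
          obtain ⟨b', r2⟩ := q
          rw [ht] at h2
          simp at h2
  · rename_i h1 h2
    rw [pvSplitOnMax_char] at h1 h2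
    cases hs : pvSplitOnce '[' ip with
    | none => rw [hs] at h1; exact absurd rfl (h1 ip)
    | some p =>
      obtain ⟨a, r⟩ := p
      rw [hs] at h2
      exact absurd rfl (h2 a r)

-- accumulator lemma for pvParse
theorem pvParse_acc : ∀ (ip : List Char) (sup hyp : List (List Char)),
    pvParse ip sup hyp =
      Option.map (fun r => (sup ++ r.1, hyp ++ r.2)) (pvParse ip [] []) := by
  suffices h : ∀ (n : Nat) (ip : List Char), ip.length ≤ n → ∀ (sup hyp : List (List Char)),
      pvParse ip sup hyp = Option.map (fun r => (sup ++ r.1, hyp ++ r.2)) (pvParse ip [] []) from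
    fun ip sup hyp => h ip.length ip le_rfl sup hyp
  intro n
  induction n with
  | zero =>
    intro ip hip sup hyp
    have hip0 : ip = [] := by cases ip with | nil => rfl | cons c t => simp at hip
    subst hip0
    rw [pvParse_eq, pvParse_eq]
    simp [pvSplitOnce]
  | succ n ih =>
    intro ip hip sup hyp
    rw [pvParse_eq ip sup hyp, pvParse_eq ip [] []]
    cases h1 : pvSplitOnce '[' ip with
    | none => by_cases hip0 : ip = [] <;> simp [hip0]
    | some p =>
      obtain ⟨a, ip1⟩ := p
      dsimp only
      cases h2 : pvSplitOnce ']' ip1 with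
      | none => simp
      | some q =>
        obtain ⟨b, ip2⟩ := q
        dsimp only
        simp only [List.nil_append]
        have hlen : ip2.length ≤ n := by
          have l1 := pvSplitOnce_length h1
          have l2 := pvSplitOnce_length h2
          omega
        rw [ih ip2 hlen (if a = [] then sup else sup ++ [a]) (if b = [] then hyp else hyp ++ [b]),
            ih ip2 hlen (if a = [] then [] else [a]) (if b = [] then [] else [b])]
        cases hp : pvParse ip2 [] [] with
        | none => simp
        | some r =>
          obtain ⟨rs, rh⟩ := r
          simp only [Option.map_some]
          by_cases ha : a = [] <;> by_cases hb : b = [] <;> simp [ha, hb]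

-- parse pieces are pure: supernets have no '[', hypernets no ']'
theorem pvParse_pure : ∀ (ip : List Char) {sups hyps : List (List Char)},
    pvParse ip [] [] = some (sups, hyps) →
    (∀ seg ∈ sups, '[' ∉ seg) ∧ (∀ seg ∈ hyps, ']' ∉ seg) := by
  suffices h : ∀ (n : Nat) (ip : List Char), ip.length ≤ n →
      ∀ (sup hyp sups hyps : List (List Char)), pvParse ip sup hyp = some (sups, hyps) →
      (∀ seg ∈ sup, '[' ∉ seg) → (∀ seg ∈ hyp, ']' ∉ seg) →
      (∀ seg ∈ sups, '[' ∉ seg) ∧ (∀ seg ∈ hyps, ']' ∉ seg) from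
    fun ip sups hyps hp =>
      h ip.length ip le_rfl [] [] sups hyps hp (by simp) (by simp)
  intro n
  induction n with
  | zero =>
    intro ip hip sup hyp sups hyps hp hsup hhyp
    have hip0 : ip = [] := by cases ip with | nil => rfl | cons c t => simp at hip
    subst hip0
    rw [pvParse_eq] at hp
    simp [pvSplitOnce] at hp
    obtain ⟨rfl, rfl⟩ := hp
    exact ⟨hsup, hhyp⟩
  | succ n ih =>
    intro ip hip sup hyp sups hyps hp hsup hhyp
    rw [pvParse_eq] at hp
    cases h1 : pvSplitOnce '[' ip with
    | none =>
      rw [h1] at hp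
      dsimp only at hp
      simp only [Option.some.injEq, Prod.mk.injEq] at hp
      obtain ⟨h2, rfl⟩ := hp
      have hnolb : '[' ∉ ip := pvSplitOnce_none_iff.1 h1
      refine ⟨?_, hhyp⟩
      intro seg hseg
      rw [← h2] at hseg
      by_cases hip0 : ip = []
      · rw [if_pos hip0] at hseg; exact hsup seg hseg
      · rw [if_neg hip0] at hseg
        rcases List.mem_append.1 hseg with h | h
        · exact hsup seg h
        · simp at h; subst h; exact hnolb
    | some p =>
      obtain ⟨a, ip1⟩ := p
      rw [h1] at hp
      dsimp only at hp
      cases h2 : pvSplitOnce ']' ip1 with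
      | none => rw [h2] at hp; simp at hp
      | some q =>
        obtain ⟨b, ip2⟩ := q
        rw [h2] at hp
        dsimp only at hp
        have hlen : ip2.length ≤ n := by
          have l1 := pvSplitOnce_length h1
          have l2 := pvSplitOnce_length h2
          omega
        have hna : '[' ∉ a := (pvSplitOnce_some h1).2
        have hnb : ']' ∉ b := (pvSplitOnce_some h2).2
        refine ih ip2 hlen _ _ sups hyps hp ?_ ?_
        · intro seg hseg
          by_cases ha : a = []
          · rw [if_pos ha] at hseg; exact hsup seg hseg
          · rw [if_neg ha] at hseg
            rcases List.mem_append.1 hseg with h | h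
            · exact hsup seg h
            · simp at h; subst h; exact hna
        · intro seg hseg
          by_cases hb : b = []
          · rw [if_pos hb] at hseg; exact hhyp seg hseg
          · rw [if_neg hb] at hseg
            rcases List.mem_append.1 hseg with h | h
            · exact hhyp seg h
            · simp at h; subst h; exact hnb

-- the bracket state machine, from an arbitrary start state
def pvBrF (st : Bool) (s : List Char) : Bool :=
  s.foldl (fun st c => if st then decide (c ≠ ']') else decide (c = '[')) st

theorem pvBrState_eq (s : List Char) : pvBrState s = pvBrF false s := rfl

theorem pvBrF_append (st : Bool) (a b : List Char) :
    pvBrF st (a ++ b) = pvBrF (pvBrF st a) b := List.foldl_append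

theorem pvBrF_false {s : List Char} (h : '[' ∉ s) : pvBrF false s = false := by
  induction s with
  | nil => rfl
  | cons c t ih =>
    have hc : c ≠ '[' := fun hh => h (by simp [hh])
    have ht : '[' ∉ t := fun hh => h (List.mem_cons_of_mem _ hh)
    have hrfl : pvBrF false (c :: t) = pvBrF (decide (c = '[')) t := rfl
    rw [hrfl, decide_eq_false hc]
    exact ih ht

theorem pvBrF_true {s : List Char} (h : ']' ∉ s) : pvBrF true s = true := by
  induction s with
  | nil => rfl
  | cons c t ih =>
    have hc : c ≠ ']' := fun hh => h (by simp [hh])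
    have ht : ']' ∉ t := fun hh => h (List.mem_cons_of_mem _ hh)
    have hrfl : pvBrF true (c :: t) = pvBrF (decide (c ≠ ']')) t := rfl
    rw [hrfl, decide_eq_true hc]
    exact ih ht

theorem pvBrF_false_lb (s : List Char) : pvBrF false ('[' :: s) = pvBrF true s := rfl

theorem pvBrF_true_rb (s : List Char) : pvBrF true (']' :: s) = pvBrF false s := rfl

-- Pre_ holds exactly where the parse succeeds
theorem pvParse_isSome : ∀ (ip : List Char),
    (pvParse ip [] []).isSome = true ↔ pvBrState ip = false := by
  suffices h : ∀ (n : Nat) (ip : List Char), ip.length ≤ n →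
      ((pvParse ip [] []).isSome = true ↔ pvBrState ip = false) from
    fun ip => h ip.length ip le_rfl
  intro n
  induction n with
  | zero =>
    intro ip hip
    have hip0 : ip = [] := by cases ip with | nil => rfl | cons c t => simp at hip
    subst hip0
    rw [pvParse_eq]
    simp [pvSplitOnce, pvBrState]
  | succ n ih =>
    intro ip hip
    rw [pvParse_eq]
    cases h1 : pvSplitOnce '[' ip with
    | none =>
      have hnolb : '[' ∉ ip := pvSplitOnce_none_iff.1 h1
      rw [pvBrState_eq, pvBrF_false hnolb]
      simp
    | some p =>
      obtain ⟨a, ip1⟩ := p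
      dsimp only
      cases h2 : pvSplitOnce ']' ip1 with
      | none =>
        dsimp only
        obtain ⟨rfl, hna⟩ := pvSplitOnce_some h1
        have hnorb : ']' ∉ ip1 := pvSplitOnce_none_iff.1 h2
        rw [pvBrState_eq, pvBrF_append, pvBrF_false hna, pvBrF_false_lb, pvBrF_true hnorb]
        simp
      | some q =>
        obtain ⟨b, ip2⟩ := q
        dsimp only
        obtain ⟨rfl, hna⟩ := pvSplitOnce_some h1
        obtain ⟨rfl, hnb⟩ := pvSplitOnce_some h2
        have hlen : ip2.length ≤ n := by
          have l1 := pvSplitOnce_length h1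
          have l2 := pvSplitOnce_length h2
          simp only [List.length_append, List.length_cons] at hip ⊢
          omega
        rw [pvBrState_eq, pvBrF_append, pvBrF_false hna, pvBrF_false_lb, pvBrF_append,
            pvBrF_true hnb, pvBrF_true_rb, pvParse_acc]
        simp only [Option.isSome_map]
        rw [← pvBrState_eq]
        exact ih ip2 hlen

-- main bridge: B's scan over ip collects exactly the per-segment windows of A's parse
theorem pvMain : ∀ (ip : List Char) (sups hyps : List (List Char)),
    pvParse ip [] [] = some (sups, hyps) → ∀ (H S : PySem.Set (List Char)),
    ∃ f2 w2 H2 S2, ip.foldl pvStep (false, [], H, S) = (f2, w2, H2, S2) ∧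
      (∀ t, t ∈ H2 ↔ t ∈ H ∨ ∃ seg ∈ hyps, pvHypWin seg t) ∧
      (∀ t, t ∈ S2 ↔ t ∈ S ∨ ∃ seg ∈ sups, pvSupWin seg t) := by
  suffices h : ∀ (n : Nat) (ip : List Char), ip.length ≤ n → ∀ (sups hyps : List (List Char)),
      pvParse ip [] [] = some (sups, hyps) → ∀ (H S : PySem.Set (List Char)),
      ∃ f2 w2 H2 S2, ip.foldl pvStep (false, [], H, S) = (f2, w2, H2, S2) ∧
        (∀ t, t ∈ H2 ↔ t ∈ H ∨ ∃ seg ∈ hyps, pvHypWin seg t) ∧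
        (∀ t, t ∈ S2 ↔ t ∈ S ∨ ∃ seg ∈ sups, pvSupWin seg t) from
    fun ip sups hyps hp => h ip.length ip le_rfl sups hyps hp
  intro n
  induction n with
  | zero =>
    intro ip hip sups hyps hp H S
    have hip0 : ip = [] := by cases ip with | nil => rfl | cons c t => simp at hip
    subst hip0
    rw [pvParse_eq] at hp
    simp [pvSplitOnce] at hp
    obtain ⟨rfl, rfl⟩ := hp
    exact ⟨false, [], H, S, rfl, by simp, by simp⟩
  | succ n ih =>
    intro ip hip sups hyps hp H S
    rw [pvParse_eq] at hp
    cases h1 : pvSplitOnce '[' ip with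
    | none =>
      rw [h1] at hp
      dsimp only at hp
      simp only [Option.some.injEq, Prod.mk.injEq] at hp
      obtain ⟨hsups, rfl⟩ := hp
      have hnolb : '[' ∉ ip := pvSplitOnce_none_iff.1 h1
      obtain ⟨w2, S2, heq, -, -, hmem⟩ := pvScanOut ip hnolb [] H S (by simp) (by simp)
      refine ⟨false, w2, H, S2, heq, by simp, fun t => ?_⟩
      rw [hmem t]
      simp only [List.nil_append]
      rw [← hsups]
      simp only [List.nil_append]
      by_cases hip0 : ip = []
      · subst hip0
        constructor
        · rintro (h | ⟨x, y, hwin, -⟩)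
          · exact Or.inl h
          · exact absurd hwin (pvAbaWin_short (by simp))
        · rintro (h | ⟨seg, hseg, -⟩)
          · exact Or.inl h
          · simp at hseg
      · rw [if_neg hip0]
        constructor
        · rintro (h | h)
          · exact Or.inl h
          · exact Or.inr ⟨ip, by simp, h⟩
        · rintro (h | ⟨seg, hseg, hwin⟩)
          · exact Or.inl h
          · rw [List.mem_singleton] at hseg
            subst hseg
            exact Or.inr hwin
    | some p =>
      obtain ⟨a, ip1⟩ := p
      rw [h1] at hp
      dsimp only at hp
      cases h2 : pvSplitOnce ']' ip1 with
      | none => rw [h2] at hp; simp at hp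
      | some q =>
        obtain ⟨b, ip2⟩ := q
        rw [h2] at hp
        dsimp only at hp
        simp only [List.nil_append] at hp
        rw [pvParse_acc] at hp
        cases hp2 : pvParse ip2 [] [] with
        | none => rw [hp2] at hp; simp at hp
        | some r =>
          obtain ⟨s', h'⟩ := r
          rw [hp2] at hp
          simp only [Option.map_some, Option.some.injEq, Prod.mk.injEq] at hp
          obtain ⟨hsups, hhyps⟩ := hp
          have hlen : ip2.length ≤ n := by
            have l1 := pvSplitOnce_length h1
            have l2 := pvSplitOnce_length h2
            omega
          obtain ⟨rfl, hna⟩ := pvSplitOnce_some h1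
          obtain ⟨rfl, hnb⟩ := pvSplitOnce_some h2
          rw [List.foldl_append]
          obtain ⟨wa, Sa, heqa, -, -, hmemS⟩ := pvScanOut a hna [] H S (by simp) (by simp)
          rw [heqa, List.foldl_cons]
          have hstepl : pvStep (false, wa, H, Sa) '[' = (true, [], H, Sa) := by simp [pvStep]
          rw [hstepl, List.foldl_append]
          obtain ⟨wb, Hb, heqb, -, -, hmemH⟩ := pvScanIn b hnb [] H Sa (by simp) (by simp)
          rw [heqb, List.foldl_cons]
          have hstepr : pvStep (true, wb, Hb, Sa) ']' = (false, [], Hb, Sa) := by simp [pvStep]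
          rw [hstepr]
          obtain ⟨f2, w2, H2, S2, heq2, hH2, hS2⟩ := ih ip2 hlen s' h' hp2 Hb Sa
          refine ⟨f2, w2, H2, S2, heq2, fun t => ?_, fun t => ?_⟩
          · rw [hH2 t, hmemH t]
            simp only [List.nil_append]
            rw [← hhyps]
            constructor
            · rintro ((h | h) | ⟨seg, hseg, hwin⟩)
              · exact Or.inl h
              · refine Or.inr ⟨b, ?_, h⟩
                have hb0 : b ≠ [] := by
                  intro hb; subst hb
                  obtain ⟨x, y, hwin, -⟩ := h
                  exact absurd hwin (pvAbaWin_short (by simp))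
                simp [hb0]
              · refine Or.inr ⟨seg, ?_, hwin⟩
                by_cases hb0 : b = [] <;> simp [hb0, hseg]
            · rintro (h | ⟨seg, hseg, hwin⟩)
              · exact Or.inl (Or.inl h)
              · by_cases hb0 : b = []
                · rw [if_pos hb0] at hseg
                  exact Or.inr ⟨seg, hseg, hwin⟩
                · rw [if_neg hb0] at hseg
                  rcases List.mem_append.1 hseg with hsg | hsg
                  · simp only [List.mem_singleton] at hsg
                    subst hsg
                    exact Or.inl (Or.inr hwin)
                  · exact Or.inr ⟨seg, hsg, hwin⟩
          · rw [hS2 t, hmemS t]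
            simp only [List.nil_append]
            rw [← hsups]
            constructor
            · rintro ((h | h) | ⟨seg, hseg, hwin⟩)
              · exact Or.inl h
              · refine Or.inr ⟨a, ?_, h⟩
                have ha0 : a ≠ [] := by
                  intro ha; subst ha
                  obtain ⟨x, y, hwin, -⟩ := h
                  exact absurd hwin (pvAbaWin_short (by simp))
                simp [ha0]
              · refine Or.inr ⟨seg, ?_, hwin⟩
                by_cases ha0 : a = [] <;> simp [ha0, hseg]
            · rintro (h | ⟨seg, hseg, hwin⟩)
              · exact Or.inl (Or.inl h)
              · by_cases ha0 : a = []
                · rw [if_pos ha0] at hseg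
                  exact Or.inr ⟨seg, hseg, hwin⟩
                · rw [if_neg ha0] at hseg
                  rcases List.mem_append.1 hseg with hsg | hsg
                  · simp only [List.mem_singleton] at hsg
                    subst hsg
                    exact Or.inl (Or.inr hwin)
                  · exact Or.inr ⟨seg, hsg, hwin⟩

-- A's inner index loop over one supernet collects exactly its mirrored ABA windows
theorem pvMem_babsSeg (seg : List Char) (st : PySem.Set (List Char)) (t : List Char) :
    t ∈ (List.range (seg.length - 2)).foldl (fun babs i =>
        if seg.getD i ' ' = seg.getD (i + 2) ' ' ∧ seg.getD i ' ' ≠ seg.getD (i + 1) ' ' then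
          PySem.Set.add babs [seg.getD (i + 1) ' ', seg.getD i ' ', seg.getD (i + 1) ' ']
        else babs) st ↔
      t ∈ st ∨ ∃ a b, [a, b, a] ∈ pvTris seg ∧ a ≠ b ∧ t = [b, a, b] := by
  rw [pvMem_foldl_condAdd (List.range (seg.length - 2))
      (fun i => seg.getD i ' ' = seg.getD (i + 2) ' ' ∧ seg.getD i ' ' ≠ seg.getD (i + 1) ' ')
      (fun i => [seg.getD (i + 1) ' ', seg.getD i ' ', seg.getD (i + 1) ' '])]
  apply or_congr_right
  constructor
  · rintro ⟨i, hi, ⟨hac, hab⟩, rfl⟩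
    rw [List.mem_range] at hi
    have h2 : i + 2 < seg.length := by omega
    have hm := pvTris_getD seg i h2
    rw [← hac] at hm
    exact ⟨seg.getD i ' ', seg.getD (i + 1) ' ', hm, hab, rfl⟩
  · rintro ⟨a, b, hm, hab, rfl⟩
    obtain ⟨i, hi, he⟩ := pvMem_tris_exists hm
    simp only [List.cons.injEq, and_true] at he
    obtain ⟨ha, hb, ha2⟩ := he
    subst ha; subst hb
    exact ⟨i, List.mem_range.2 (by omega), ⟨ha2, hab⟩, rfl⟩

-- A's outer loop over all supernets
theorem pvMem_babs (sups : List (List Char)) : ∀ (st : PySem.Set (List Char)) (t : List Char),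
    t ∈ sups.foldl (fun babs seg =>
        (List.range (seg.length - 2)).foldl (fun babs i =>
          if seg.getD i ' ' = seg.getD (i + 2) ' ' ∧ seg.getD i ' ' ≠ seg.getD (i + 1) ' ' then
            PySem.Set.add babs [seg.getD (i + 1) ' ', seg.getD i ' ', seg.getD (i + 1) ' ']
          else babs) babs) st ↔
      t ∈ st ∨ ∃ seg ∈ sups, ∃ a b, [a, b, a] ∈ pvTris seg ∧ a ≠ b ∧ t = [b, a, b] := by
  induction sups with
  | nil => simp
  | cons seg rest ih =>
    intro st t
    rw [List.foldl_cons, ih, pvMem_babsSeg]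
    constructor
    · rintro ((h | ⟨a, b, hm, hab, rfl⟩) | ⟨sg, hsg, hw⟩)
      · exact Or.inl h
      · exact Or.inr ⟨seg, by simp, a, b, hm, hab, rfl⟩
      · exact Or.inr ⟨sg, List.mem_cons_of_mem _ hsg, hw⟩
    · rintro (h | ⟨sg, hsg, hw⟩)
      · exact Or.inl (Or.inl h)
      · rcases List.mem_cons.1 hsg with rfl | hsg'
        · obtain ⟨a, b, hm, hab, rfl⟩ := hw
          exact Or.inl (Or.inr ⟨a, b, hm, hab, rfl⟩)
        · exact Or.inr ⟨sg, hsg', hw⟩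

-- ===== VERDICT (by name: the statement is the Claim_ definition above) =====
theorem supports_ssl_spec : Claim_equal_supports_ssl := by
  intro ip _ hpre
  unfold Spec_supports_ssl supports_ssl supports_ssl_alt
  have hsome : (pvParse ip.toList [] []).isSome = true := (pvParse_isSome ip.toList).2 hpre
  obtain ⟨⟨sups, hyps⟩, hp⟩ := Option.isSome_iff_exists.1 hsome
  obtain ⟨hpureS, hpureH⟩ := pvParse_pure ip.toList hp
  obtain ⟨f2, w2, H2, S2, heq, hH, hS⟩ :=
    pvMain ip.toList sups hyps hp PySem.Set.empty PySem.Set.empty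
  rw [hp]
  dsimp only
  rw [heq]
  dsimp only
  rw [Bool.eq_iff_iff]
  rw [List.any_eq_true]
  rw [Bool.not_eq_true', Bool.eq_false_iff, Ne, PySem.Set.isdisjoint_iff]
  simp only [not_forall, not_not, exists_prop]
  constructor
  · rintro ⟨bab, hbab, hany⟩
    rw [pvMem_babs] at hbab
    rcases hbab with h0 | ⟨seg, hseg, a, b, hm, hab, rfl⟩
    · exact absurd h0 (List.not_mem_nil)
    rw [List.any_eq_true] at hany
    obtain ⟨hseg2, hh2, hin⟩ := hany
    rw [PySem.Chars.isIn_iff_infix] at hin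
    have hsub1 : [a, b, a] <:+: seg := pvMem_tris_iff_infix.1 hm
    have hAin : a ∈ seg := hsub1.subset (by simp)
    have hBin : b ∈ seg := hsub1.subset (by simp)
    have hAh : a ∈ hseg2 := hin.subset (by simp)
    have hBh : b ∈ hseg2 := hin.subset (by simp)
    have hoa : pvOkC a :=
      ⟨fun h => hpureS seg hseg (h ▸ hAin), fun h => hpureH hseg2 hh2 (h ▸ hAh)⟩
    have hob : pvOkC b :=
      ⟨fun h => hpureS seg hseg (h ▸ hBin), fun h => hpureH hseg2 hh2 (h ▸ hBh)⟩
    refine ⟨[b, a, b], ?_, ?_⟩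
    · rw [hH]
      exact Or.inr ⟨hseg2, hh2, b, a,
        ⟨pvMem_tris_iff_infix.2 hin, fun h => hab h.symm, hob, hoa⟩, rfl⟩
    · rw [hS]
      exact Or.inr ⟨seg, hseg, a, b, ⟨hm, hab, hoa, hob⟩, rfl⟩
  · rintro ⟨t0, ht0H, ht0S⟩
    rw [hH] at ht0H
    rw [hS] at ht0S
    rcases ht0H with h0 | ⟨segh, hsegh, a', b', ⟨hmh, hab', hoa', hob'⟩, rfl⟩
    · exact absurd h0 (List.not_mem_nil)
    rcases ht0S with h0 | ⟨segs, hsegs, a, b, ⟨hms, hab, hoa, hob⟩, ht0⟩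
    · exact absurd h0 (List.not_mem_nil)
    -- ht0 : [a', b', a'] = [b, a, b]
    simp only [List.cons.injEq, and_true] at ht0
    obtain ⟨hb', ha', -⟩ := ht0
    subst hb'; subst ha'
    refine ⟨[a', b', a'], ?_, ?_⟩
    · rw [pvMem_babs]
      exact Or.inr ⟨segs, hsegs, b', a', hms, hab, rfl⟩
    · rw [List.any_eq_true]
      exact ⟨segh, hsegh, by rw [PySem.Chars.isIn_iff_infix]; exact pvMem_tris_iff_infix.1 hmh⟩
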